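-- pv_equiv track=rewrite | github.com/devzero-inc/self-hosted | dz_installer/helpers.py | _get_name_locations
-- ===== SOURCE A (Python) =====
-- from typing import Any
--
-- def _get_name_locations(names: list[str], name_string: str):
--     locs: list[Any] = []
--     last_pos = 0
--     for name in names:
--         last_pos = name_string.find(name, last_pos)
--         locs.append(last_pos)
--     for i, loc in enumerate(locs):
--         if i + 1 < len(locs):
--             locs[i] = (loc, locs[i + 1])
--             continue
--         locs[i] = (loc, len(name_string))
--     return locs
-- ===== SOURCE B (Python) =====
-- def _get_name_locations(names: list[str], name_string: str):
--     locs = []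
--     prev = None
--     last_pos = 0
--     for name in names:
--         pos = name_string.find(name, last_pos)
--         if prev is not None:
--             locs.append((prev, pos))
--         prev = pos
--         last_pos = pos
--     if prev is not None:
--         locs.append((prev, len(name_string)))
--     return locs
-- ===== Notes on version B (the rewrite author's own statement) =====
-- stated objective: alternative
-- what changed: Fuses A's two passes (collect all find positions, then rewrite the list into adjacent pairs) into one interleaved scan that keeps a pending previous start and appends each completed pair as soon as the next position is known.
import Mathlib
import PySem

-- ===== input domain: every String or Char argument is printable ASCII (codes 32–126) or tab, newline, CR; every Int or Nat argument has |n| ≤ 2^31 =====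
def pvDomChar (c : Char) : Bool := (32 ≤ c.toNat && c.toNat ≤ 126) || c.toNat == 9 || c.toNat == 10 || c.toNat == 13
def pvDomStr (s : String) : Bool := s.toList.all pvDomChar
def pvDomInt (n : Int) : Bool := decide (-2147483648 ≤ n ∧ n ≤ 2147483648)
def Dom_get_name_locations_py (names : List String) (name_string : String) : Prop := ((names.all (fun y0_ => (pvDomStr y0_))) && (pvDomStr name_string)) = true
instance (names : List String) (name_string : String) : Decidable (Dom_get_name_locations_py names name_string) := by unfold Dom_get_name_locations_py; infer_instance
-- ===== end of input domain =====

-- B fuses A's two passes (collect find positions, then pair adjacent ones) into one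
-- interleaved scan keeping a pending previous start; alternative decomposition, same cost.


-- ===== PORT A =====
-- body of A's first loop: last_pos = name_string.find(name, last_pos); locs.append(last_pos)
def aStep (name_string : String) (st : List Int × Int) (name : String) : List Int × Int :=
  let lp := PySem.Str.findFrom name_string name st.2
  (st.1 ++ [lp], lp)

-- A's second loop: rewrites entry i to (locs[i], locs[i+1]) (original values — the loop
-- only reads ahead of the write index), and the last entry to (loc, len(name_string));
-- ported as a structural recursion over the collected Int list for typing reasons.
def pairAdjA (slen : Int) : List Int → List (Int × Int)
  | [] => []
  | [p] => [(p, slen)]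
  | p :: q :: rest => (p, q) :: pairAdjA slen (q :: rest)

def get_name_locations_py (names : List String) (name_string : String) : List (Int × Int) :=
  let st := names.foldl (aStep name_string) ([], 0)
  pairAdjA (PySem.Str.len name_string : Int) st.1

-- ===== PORT B =====
-- body of B's loop: pos = find(name, last_pos); append the completed pair (prev, pos)
-- if a previous start is pending; state = (locs, prev, last_pos)
def bStep (name_string : String) (st : List (Int × Int) × Option Int × Int) (name : String) :
    List (Int × Int) × Option Int × Int :=
  let pos := PySem.Str.findFrom name_string name st.2.2
  let locs := match st.2.1 with
    | none => st.1
    | some prev => st.1 ++ [(prev, pos)]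
  (locs, some pos, pos)

def get_name_locations_py_alt (names : List String) (name_string : String) : List (Int × Int) :=
  let st := names.foldl (bStep name_string) ([], none, 0)
  match st.2.1 with
  | none => st.1
  | some prev => st.1 ++ [(prev, (PySem.Str.len name_string : Int))]

-- ===== PRECONDITION & SPEC =====
def Spec_get_name_locations_py (names : List String) (name_string : String) (out : List (Int × Int)) : Prop := out = get_name_locations_py_alt names name_string
instance (names : List String) (name_string : String) (out : List (Int × Int)) : Decidable (Spec_get_name_locations_py names name_string out) := by unfold Spec_get_name_locations_py; infer_instance

-- ===== CLAIM (what is proved, stated in full; the proofs are below) =====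
def Claim_equal_get_name_locations_py : Prop := ∀ (names : List String) (name_string : String), Dom_get_name_locations_py names name_string → Spec_get_name_locations_py names name_string (get_name_locations_py names name_string)

-- ===== LEMMAS AND PROOFS =====

-- the common sequence of find positions
def posList (s : String) (lp : Int) : List String → List Int
  | [] => []
  | n :: ns => let p := PySem.Str.findFrom s n lp; p :: posList s p ns

theorem foldA_eq (s : String) (names : List String) (acc : List Int) (lp : Int) :
    names.foldl (aStep s) (acc, lp)
      = (acc ++ posList s lp names, (posList s lp names).getLastD lp) := by
  induction names generalizing acc lp with
  | nil => simp [posList]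
  | cons n ns ih =>
    simp only [List.foldl_cons, posList, aStep, ih, List.append_assoc, List.singleton_append,
      List.getLastD_cons]

theorem foldB_eq (s : String) (names : List String) (locs : List (Int × Int)) (p : Int) :
    (match (names.foldl (bStep s) (locs, some p, p)).2.1 with
      | none => (names.foldl (bStep s) (locs, some p, p)).1
      | some prev => (names.foldl (bStep s) (locs, some p, p)).1 ++ [(prev, (PySem.Str.len s : Int))])
    = locs ++ pairAdjA (PySem.Str.len s : Int) (p :: posList s p names) := by
  induction names generalizing locs p with
  | nil => simp [posList, pairAdjA]
  | cons n ns ih =>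
    simp only [List.foldl_cons, posList, bStep]
    rw [ih]
    simp [pairAdjA]

-- ===== VERDICT (by name: the statement is the Claim_ definition above) =====
theorem get_name_locations_py_spec : Claim_equal_get_name_locations_py := by
  intro names s _
  show get_name_locations_py names s = get_name_locations_py_alt names s
  unfold get_name_locations_py get_name_locations_py_alt
  cases names with
  | nil => rfl
  | cons n ns =>
    simp only [List.foldl_cons, aStep, bStep, foldA_eq, foldB_eq]
    simp
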